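-- pv_equiv track=rewrite | github.com/daniel-reich/ubiquitous-fiesta | 7BYXC8befjYqzhMsc_15.py | classify_rug
-- ===== SOURCE A (Python) =====
-- import math
--
-- def classify_rug(alist):
--     m = len(alist)
--     n = len(alist[0])
--     hcheck = 1
--     if m>=2:
--         for k in range(0, math.floor(m/2)+1):
--             if alist[k]!=alist[m-1-k]:
--                 hcheck = 0
--     vcheck = 1
--     if n>=2:
--         for k in range(0, math.floor(n/2)+1):
--             ck = [alist[p][k] for p in range(0, m)]
--             crk = [alist[p][n-1-k] for p in range(0, m)]
--             if ck!=crk: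
--                 vcheck = 0
--     if (hcheck+vcheck==2):
--         return "perfect"
--     elif hcheck==1:
--         return "horizontally symmetric"
--     elif vcheck==1:
--         return "vertically symmetric"
--     else:
--         return "imperfect"
-- ===== SOURCE B (Python) =====
-- def classify_rug(alist):
--     n = len(alist[0])
--     hcheck = alist == alist[::-1]
--     vcheck = all(row[:n] == row[:n][::-1] for row in alist)
--     if hcheck and vcheck:
--         return "perfect"
--     elif hcheck:
--         return "horizontally symmetric"
--     elif vcheck:
--         return "vertically symmetric"
--     else:
--         return "imperfect"
-- ===== Notes on version B (the rewrite author's own statement) =====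
-- stated objective: faster
-- what changed: Horizontal symmetry becomes a whole-list mirror compare (alist == alist[::-1]) and vertical symmetry is reinterpreted as each row's first-n prefix being a palindrome, traversing row-by-row with C-level slice/compare operations instead of rebuilding both column lists across all rows for each column index with Python-level indexing.
import Mathlib
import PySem

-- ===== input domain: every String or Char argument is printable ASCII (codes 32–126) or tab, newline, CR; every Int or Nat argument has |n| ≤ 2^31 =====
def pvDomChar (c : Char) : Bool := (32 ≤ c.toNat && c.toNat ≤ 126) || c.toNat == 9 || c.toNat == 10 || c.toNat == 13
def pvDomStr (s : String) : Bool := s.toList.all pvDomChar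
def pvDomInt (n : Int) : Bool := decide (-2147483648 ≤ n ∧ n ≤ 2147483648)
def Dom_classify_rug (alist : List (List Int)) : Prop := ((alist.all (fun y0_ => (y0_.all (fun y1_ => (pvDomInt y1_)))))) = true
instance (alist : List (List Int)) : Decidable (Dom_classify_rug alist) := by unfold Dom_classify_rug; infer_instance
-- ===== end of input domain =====

-- B checks vertical symmetry row-by-row (each row's first-n prefix a palindrome) and horizontal
-- symmetry as a whole-list mirror compare, instead of A's per-column rebuild across all rows;
-- objective: idiomatic.

-- ===== PORT A =====
-- A's local 'hcheck' loop, as a helper (m = len(alist))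
def pvHcheckA (alist : List (List Int)) : Int :=
  if (alist.length : Int) ≥ 2 then
    (PySem.List.pyRange 0 (PySem.Int.floordiv (alist.length : Int) 2 + 1) 1).foldl
      (fun hcheck k =>
        if PySem.List.pyGetD alist k [] ≠ PySem.List.pyGetD alist ((alist.length : Int) - 1 - k) [] then 0
        else hcheck) 1
  else 1

-- A's local 'vcheck' loop, as a helper (n = len(alist[0]), m = len(alist))
def pvVcheckA (alist : List (List Int)) : Int :=
  if (((PySem.List.pyGet? alist 0).getD []).length : Int) ≥ 2 then
    (PySem.List.pyRange 0 (PySem.Int.floordiv (((PySem.List.pyGet? alist 0).getD []).length : Int) 2 + 1) 1).foldl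
      (fun vcheck k =>
        let ck := (PySem.List.pyRange 0 (alist.length : Int) 1).map
          (fun p => PySem.List.pyGetD (PySem.List.pyGetD alist p []) k 0)
        let crk := (PySem.List.pyRange 0 (alist.length : Int) 1).map
          (fun p => PySem.List.pyGetD (PySem.List.pyGetD alist p []) ((((PySem.List.pyGet? alist 0).getD []).length : Int) - 1 - k) 0)
        if ck ≠ crk then 0 else vcheck) 1
  else 1

def classify_rug (alist : List (List Int)) : String :=
  if pvHcheckA alist + pvVcheckA alist = 2 then "perfect"
  else if pvHcheckA alist = 1 then "horizontally symmetric"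
  else if pvVcheckA alist = 1 then "vertically symmetric"
  else "imperfect"

-- ===== PORT B =====
def classify_rug_alt (alist : List (List Int)) : String :=
  let n : Int := (((PySem.List.pyGet? alist 0).getD []).length : Int)
  let hcheck : Bool := alist == alist.reverse
  let vcheck : Bool := alist.all
    (fun row => PySem.List.slice row none (some n) == (PySem.List.slice row none (some n)).reverse)
  if hcheck && vcheck then "perfect"
  else if hcheck then "horizontally symmetric"
  else if vcheck then "vertically symmetric"
  else "imperfect"

-- ===== PRECONDITION & SPEC =====
-- Pre_ is exactly A's return domain: A raises IndexError on the empty grid (alist[0]) and, when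
-- n = len(alist[0]) ≥ 2, on any grid with a row shorter than n (alist[p][n-1]).
def Pre_classify_rug (alist : List (List Int)) : Prop :=
  alist ≠ [] ∧ ((alist.headD []).length ≤ 1 ∨ ∀ row ∈ alist, (alist.headD []).length ≤ row.length)
instance (alist : List (List Int)) : Decidable (Pre_classify_rug alist) := by
  unfold Pre_classify_rug; infer_instance
def pvWitness_classify_rug : List (List Int) := [[1, 2], [3, 4]]

def Spec_classify_rug (alist : List (List Int)) (out : String) : Prop := out = classify_rug_alt alist
instance (alist : List (List Int)) (out : String) : Decidable (Spec_classify_rug alist out) := by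
  unfold Spec_classify_rug; infer_instance

-- ===== CLAIM (what is proved, stated in full; the proofs are below) =====
def Claim_equal_classify_rug : Prop := ∀ (alist : List (List Int)), Dom_classify_rug alist → Pre_classify_rug alist → Spec_classify_rug alist (classify_rug alist)

-- ===== LEMMAS AND PROOFS =====

-- a 0/1 flag that a loop zeroes when any iteration trips
theorem pv_foldl_flag (l : List Int) (P : Int → Prop) [DecidablePred P] (a : Int) :
    l.foldl (fun h k => if P k then 0 else h) a = if ∃ k ∈ l, P k then 0 else a := by
  induction l generalizing a with
  | nil => simp
  | cons x t ih =>
    simp only [List.foldl_cons, ih, List.exists_mem_cons_iff]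
    by_cases hx : P x <;> by_cases ht : ∃ k ∈ t, P k <;> simp [hx, ht]

-- mirror check on the first half of the indices ⟺ the list equals its reverse
theorem pv_mirror_iff {α : Type} (l : List α) (d : α) :
    (∀ j : Nat, j ≤ l.length / 2 → l.getD j d = l.getD (l.length - 1 - j) d) ↔
      l = l.reverse := by
  constructor
  · intro h
    apply List.ext_getElem (by simp)
    intro i h1 h2
    rw [List.getElem_reverse]
    by_cases hi : i ≤ l.length / 2
    · have := h i hi
      rwa [List.getD_eq_getElem l d h1, List.getD_eq_getElem l d (by omega)] at this
    · have := h (l.length - 1 - i) (by omega)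
      rw [List.getD_eq_getElem l d (by omega), List.getD_eq_getElem l d (by omega)] at this
      have he : l.length - 1 - (l.length - 1 - i) = i := by omega
      simp_rw [he] at this
      exact this.symm
  · intro h j hj
    rcases Nat.eq_zero_or_pos l.length with h0 | h0
    · rw [List.length_eq_zero_iff.mp h0]; rfl
    · have hjl : j < l.length := by omega
      rw [List.getD_eq_getElem l d hjl, List.getD_eq_getElem l d (by omega)]
      rw [List.getElem_of_eq h hjl, List.getElem_reverse]

theorem pv_floordiv_two (L : Nat) : PySem.Int.floordiv (L : Int) 2 = ((L / 2 : Nat) : Int) := by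
  exact_mod_cast PySem.Int.floordiv_natCast L 2

-- the ∃ over A's half-range, in Nat form
theorem pv_exists_range (L : Nat) (P : Int → Prop) [DecidablePred P] :
    (∃ k ∈ PySem.List.pyRange 0 ((L / 2 : Nat) + 1 : Int) 1, P k) ↔
      ∃ j : Nat, j ≤ L / 2 ∧ P (j : Int) := by
  constructor
  · rintro ⟨k, hk, hP⟩
    rw [PySem.List.mem_pyRange_one] at hk
    refine ⟨k.toNat, by omega, ?_⟩
    have : ((k.toNat : Int)) = k := by omega
    rwa [this]
  · rintro ⟨j, hj, hP⟩
    exact ⟨(j : Int), by rw [PySem.List.mem_pyRange_one]; omega, hP⟩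

-- lists of length ≤ 1 are palindromes
theorem pv_short_palin {α : Type} (l : List α) (h : l.length ≤ 1) : l = l.reverse := by
  match l, h with
  | [], _ => rfl
  | [x], _ => rfl

theorem pv_head_eq (alist : List (List Int)) :
    (PySem.List.pyGet? alist 0).getD [] = alist.headD [] := by
  cases alist with
  | nil => decide
  | cons r0 rest => simp [PySem.List.pyGet?_zero_cons]

-- reading an in-prefix entry of a row through its take-n prefix
theorem pv_take_getD (row : List Int) (N i : Nat) (hi : i < N) (hlen : N ≤ row.length) :
    PySem.List.pyGetD row (i : Int) 0 = (row.take N).getD i 0 := by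
  rw [PySem.List.pyGetD_natCast, List.getD_eq_getElem row 0 (by omega),
    List.getD_eq_getElem _ 0 (by rw [List.length_take]; omega), List.getElem_take]

-- one row's half-range mirror condition ⟺ its first-N prefix is a palindrome
theorem pv_row_iff (row : List Int) (N : Nat) (h2N : 2 ≤ N) (hlenr : N ≤ row.length) :
    (∀ j : Nat, j ≤ N / 2 →
        PySem.List.pyGetD row (j : Int) 0 = PySem.List.pyGetD row ((N : Int) - 1 - (j : Int)) 0) ↔
      row.take N = (row.take N).reverse := by
  have htl : (row.take N).length = N := by rw [List.length_take]; omega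
  constructor
  · intro h
    apply (pv_mirror_iff (row.take N) 0).mp
    intro j hj
    rw [htl] at hj
    have hjN : j < N := by omega
    have hx := h j hj
    have hji : ((N : Int) - 1 - (j : Int)) = ((N - 1 - j : Nat) : Int) := by omega
    rw [hji, pv_take_getD row N j hjN hlenr, pv_take_getD row N (N - 1 - j) (by omega) hlenr] at hx
    rwa [htl]
  · intro h j hj
    have hp := (pv_mirror_iff (row.take N) 0).mpr h j (by rw [htl]; omega)
    rw [htl] at hp
    have hjN : j < N := by omega
    have hji : ((N : Int) - 1 - (j : Int)) = ((N - 1 - j : Nat) : Int) := by omega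
    rw [hji, pv_take_getD row N j hjN hlenr, pv_take_getD row N (N - 1 - j) (by omega) hlenr]
    exact hp

-- A's hcheck in closed form (for any nonempty alist)
theorem pv_hcheck (alist : List (List Int)) (hne : alist ≠ []) :
    pvHcheckA alist = (if alist = alist.reverse then (1 : Int) else 0) := by
  unfold pvHcheckA
  by_cases hm : (alist.length : Int) ≥ 2
  · rw [if_pos hm, pv_floordiv_two, pv_foldl_flag]
    have key : (∃ k ∈ PySem.List.pyRange 0 ((alist.length / 2 : Nat) + 1 : Int) 1,
        PySem.List.pyGetD alist k [] ≠ PySem.List.pyGetD alist ((alist.length : Int) - 1 - k) []) ↔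
        ¬ (alist = alist.reverse) := by
      rw [pv_exists_range, ← pv_mirror_iff alist []]
      push Not
      constructor
      · rintro ⟨j, hj, hne'⟩
        refine ⟨j, hj, ?_⟩
        intro heq
        apply hne'
        have hji : ((alist.length : Int) - 1 - (j : Int)) = ((alist.length - 1 - j : Nat) : Int) := by omega
        rw [hji]
        simpa [PySem.List.pyGetD_natCast] using heq
      · rintro ⟨j, hj, hne'⟩
        refine ⟨j, hj, ?_⟩
        have hji : ((alist.length : Int) - 1 - (j : Int)) = ((alist.length - 1 - j : Nat) : Int) := by omega
        rw [hji]
        simpa [PySem.List.pyGetD_natCast] using hne'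
    simp only [key]
    by_cases h : alist = alist.reverse
    · rw [if_neg (not_not_intro h), if_pos h]
    · rw [if_pos h, if_neg h]
  · rw [if_neg hm]
    have h1 : alist.length = 1 := by
      have : alist.length ≠ 0 := by simpa [List.length_eq_zero_iff] using hne
      omega
    match alist, h1 with
    | [r], _ => simp

-- A's vcheck in closed form on A's return domain
theorem pv_vcheck (alist : List (List Int)) (hne : alist ≠ [])
    (hpre : (alist.headD []).length ≤ 1 ∨ ∀ row ∈ alist, (alist.headD []).length ≤ row.length) :
    pvVcheckA alist =
      (if ∀ row ∈ alist, row.take ((alist.headD []).length) = (row.take ((alist.headD []).length)).reverse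
       then (1 : Int) else 0) := by
  obtain ⟨r0, rest, rfl⟩ : ∃ r0 rest, alist = r0 :: rest := by
    cases alist with
    | nil => exact absurd rfl hne
    | cons a b => exact ⟨a, b, rfl⟩
  have hget0 : (PySem.List.pyGet? (r0 :: rest) 0).getD [] = r0 := by
    simp
  have hhead : (r0 :: rest).headD [] = r0 := rfl
  unfold pvVcheckA
  rw [hget0, hhead]
  have hcol : ∀ k : Int,
      ((PySem.List.pyRange 0 ((r0 :: rest).length : Int) 1).map
          (fun p => PySem.List.pyGetD (PySem.List.pyGetD (r0 :: rest) p []) k 0) =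
        (PySem.List.pyRange 0 ((r0 :: rest).length : Int) 1).map
          (fun p => PySem.List.pyGetD (PySem.List.pyGetD (r0 :: rest) p []) ((r0.length : Int) - 1 - k) 0)) ↔
      ∀ row ∈ r0 :: rest, PySem.List.pyGetD row k 0 = PySem.List.pyGetD row ((r0.length : Int) - 1 - k) 0 := by
    intro k
    rw [List.map_inj_left]
    constructor
    · intro h row hrow
      obtain ⟨j, hj, hjr⟩ := List.getElem_of_mem hrow
      have hmem : (j : Int) ∈ PySem.List.pyRange 0 ((r0 :: rest).length : Int) 1 := by
        rw [PySem.List.mem_pyRange_one]; omega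
      have := h (j : Int) hmem
      have hpg : PySem.List.pyGetD (r0 :: rest) (j : Int) [] = row := by
        rw [PySem.List.pyGetD_natCast, List.getD_eq_getElem _ [] hj, hjr]
      rwa [hpg] at this
    · intro h p hp
      rw [PySem.List.mem_pyRange_one] at hp
      have hp' : ((p.toNat : Int)) = p := by omega
      rw [← hp', PySem.List.pyGetD_natCast]
      have hptn : p.toNat < (r0 :: rest).length := by omega
      rw [List.getD_eq_getElem _ [] hptn]
      exact h _ (List.getElem_mem hptn)
  by_cases hn : ((r0.length : Nat) : Int) ≥ 2
  · have h2N : 2 ≤ r0.length := by exact_mod_cast hn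
    have hlen : ∀ row ∈ r0 :: rest, r0.length ≤ row.length := by
      rcases hpre with hle | hall
      · rw [hhead] at hle; omega
      · simpa [hhead] using hall
    rw [if_pos hn, pv_floordiv_two, pv_foldl_flag]
    have key : (∃ k ∈ PySem.List.pyRange 0 ((r0.length / 2 : Nat) + 1 : Int) 1,
        ¬ ((PySem.List.pyRange 0 ((r0 :: rest).length : Int) 1).map
            (fun p => PySem.List.pyGetD (PySem.List.pyGetD (r0 :: rest) p []) k 0) =
          (PySem.List.pyRange 0 ((r0 :: rest).length : Int) 1).map
            (fun p => PySem.List.pyGetD (PySem.List.pyGetD (r0 :: rest) p []) ((r0.length : Int) - 1 - k) 0))) ↔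
        ¬ ∀ row ∈ r0 :: rest, row.take r0.length = (row.take r0.length).reverse := by
      rw [pv_exists_range]
      constructor
      · rintro ⟨j, hj, hne'⟩
        rw [hcol] at hne'
        push Not at hne' ⊢
        obtain ⟨row, hrow, hneq⟩ := hne'
        exact ⟨row, hrow, fun heq =>
          hneq ((pv_row_iff row r0.length h2N (hlen row hrow)).mpr heq j hj)⟩
      · intro hne'
        push Not at hne'
        obtain ⟨row, hrow, hneq⟩ := hne'
        have := (not_iff_not.mpr (pv_row_iff row r0.length h2N (hlen row hrow))).mpr hneq
        push Not at this
        obtain ⟨j, hj, hneq'⟩ := this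
        refine ⟨j, hj, ?_⟩
        rw [hcol]
        push Not
        exact ⟨row, hrow, hneq'⟩
    simp only [key]
    by_cases h : ∀ row ∈ r0 :: rest, row.take r0.length = (row.take r0.length).reverse
    · rw [if_neg (not_not_intro h), if_pos h]
    · rw [if_pos h, if_neg h]
  · rw [if_neg hn]
    have hall : ∀ row ∈ r0 :: rest, row.take r0.length = (row.take r0.length).reverse := by
      intro row hrow
      apply pv_short_palin
      rw [List.length_take]
      omega
    rw [if_pos hall]

-- B's branches in closed form
theorem pv_alt_closed (alist : List (List Int)) :
    classify_rug_alt alist =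
      (if alist = alist.reverse ∧
          (∀ row ∈ alist, row.take ((alist.headD []).length) = (row.take ((alist.headD []).length)).reverse)
       then "perfect"
       else if alist = alist.reverse then "horizontally symmetric"
       else if (∀ row ∈ alist, row.take ((alist.headD []).length) = (row.take ((alist.headD []).length)).reverse)
       then "vertically symmetric"
       else "imperfect") := by
  unfold classify_rug_alt
  simp only [pv_head_eq, PySem.List.slice_to_natCast]
  cases hb1 : (alist == alist.reverse) <;>
    cases hb2 : (alist.all fun row =>
        row.take ((alist.headD []).length) == (row.take ((alist.headD []).length)).reverse) <;>
      simp only [hb1, hb2, Bool.false_and, Bool.true_and, Bool.false_eq_true,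
        Bool.and_self, if_false, if_true]
  · have h1 : ¬ alist = alist.reverse := by simpa using hb1
    have h2 : ¬ ∀ row ∈ alist, row.take ((alist.headD []).length) = (row.take ((alist.headD []).length)).reverse := by
      simpa using hb2
    rw [if_neg (fun h => h1 h.1), if_neg h1, if_neg h2]
  · have h1 : ¬ alist = alist.reverse := by simpa using hb1
    have h2 : ∀ row ∈ alist, row.take ((alist.headD []).length) = (row.take ((alist.headD []).length)).reverse := by
      simpa using hb2
    rw [if_neg (fun h => h1 h.1), if_neg h1, if_pos h2]
  · have h1 : alist = alist.reverse := by simpa using hb1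
    have h2 : ¬ ∀ row ∈ alist, row.take ((alist.headD []).length) = (row.take ((alist.headD []).length)).reverse := by
      simpa using hb2
    rw [if_neg (fun h => h2 h.2), if_pos h1]
  · have h1 : alist = alist.reverse := by simpa using hb1
    have h2 : ∀ row ∈ alist, row.take ((alist.headD []).length) = (row.take ((alist.headD []).length)).reverse := by
      simpa using hb2
    rw [if_pos (⟨h1, h2⟩ : _ ∧ _)]

-- ===== VERDICT (by name: the statement is the Claim_ definition above) =====
theorem classify_rug_spec : Claim_equal_classify_rug := by
  intro alist _hdom hpre
  obtain ⟨hne, hrest⟩ := hpre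
  unfold Spec_classify_rug classify_rug
  rw [pv_hcheck alist hne, pv_vcheck alist hne hrest, pv_alt_closed]
  by_cases h1 : alist = alist.reverse <;>
    by_cases h2 : ∀ row ∈ alist, row.take ((alist.headD []).length) = (row.take ((alist.headD []).length)).reverse
  · rw [if_pos h1, if_pos h2, if_pos (⟨h1, h2⟩ : _ ∧ _)]
    norm_num
  · rw [if_pos h1, if_neg h2, if_neg (fun h => h2 (And.right h)), if_pos h1]
    norm_num
  · rw [if_neg h1, if_pos h2, if_neg (fun h => h1 (And.left h)), if_neg h1, if_pos h2]
    norm_num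
  · rw [if_neg h1, if_neg h2, if_neg (fun h => h1 (And.left h)), if_neg h1, if_neg h2]
    norm_num
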